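-- pv_equiv track=rewrite | github.com/ManuelG28/Numerikiando | UserInterface/CubicSpline.py | setAnsw
-- ===== SOURCE A (Python) =====
-- def setAnsw(msg):
--     msgArr = msg.split("x")
--     coef=""
--     answ="SPLINES: \n"
--     cont=0
--     for i in range(len(msgArr)-1,0,-1):
--         coef= (msgArr[i])[3:len(msgArr[i])-2]
--         if "=" in coef:
--             coef = coef[1:]
--         if (cont==0):
--             answ += coef+"x^3+"
--             cont+=1
--         else:
--             if cont==1:
--                 answ += coef+"x^2+"
--                 cont+=1
--             else:
--                 if cont==2:
--                     answ += coef+"x+"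
--                     cont+=1
--                 else:
--                     answ += coef+"\n"
--                     cont=0
--     return answ
-- ===== SOURCE B (Python) =====
-- def _clean(s):
--     c = s[3:len(s) - 2]
--     return c[1:] if "=" in c else c
--
-- def _render(cs):
--     if not cs:
--         return ""
--     line = cs[0] + "x^3+"
--     if len(cs) > 1:
--         line += cs[1] + "x^2+"
--     if len(cs) > 2:
--         line += cs[2] + "x+"
--     if len(cs) > 3:
--         line += cs[3] + "\n"
--     return line + _render(cs[4:])
--
-- def setAnsw(msg):
--     pieces = msg.split("x")[1:]
--     pieces.reverse()
--     return "SPLINES: \n" + _render([_clean(p) for p in pieces])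
-- ===== Notes on version B (the rewrite author's own statement) =====
-- stated objective: alternative
-- what changed: Replaces A's single reverse-index loop with a mutable counter and nested if-chain by: reversing the tail of the split list directly, cleaning every piece into a coefficient list, and a recursive renderer that consumes up to FOUR coefficients per call to emit one whole polynomial line (partial last group handled by length checks), with no counter and no index arithmetic.
import Mathlib
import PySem

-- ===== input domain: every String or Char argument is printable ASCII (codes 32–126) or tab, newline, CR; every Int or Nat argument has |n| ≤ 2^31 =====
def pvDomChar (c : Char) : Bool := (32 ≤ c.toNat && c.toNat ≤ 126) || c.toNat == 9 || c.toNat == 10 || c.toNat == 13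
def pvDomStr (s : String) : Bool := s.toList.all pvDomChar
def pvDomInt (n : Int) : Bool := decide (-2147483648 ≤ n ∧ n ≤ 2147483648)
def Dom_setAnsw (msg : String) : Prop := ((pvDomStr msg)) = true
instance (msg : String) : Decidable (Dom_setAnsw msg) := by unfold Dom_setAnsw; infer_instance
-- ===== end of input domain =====

-- B: instead of A's reverse-index loop with a mod-4 counter, B reverses the tail of the split
-- list, cleans each piece into a coefficient, and renders recursively four coefficients at a
-- time (one polynomial line per recursive call); same asymptotic cost, different decomposition.

-- ===== PORT A =====
-- A's loop body: state is (coef, answ, cont); loop over range(len(msgArr)-1, 0, -1).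
def setAnswStep (msgArr : List (List Char)) (st : List Char × List Char × Int) (i : Int) :
    List Char × List Char × Int :=
  let s := PySem.List.pyGetD msgArr i []
  let coef := PySem.List.slice s (some 3) (some (PySem.List.len s - 2))
  let coef := if PySem.Chars.isIn ['='] coef then PySem.List.slice coef (some 1) none else coef
  if st.2.2 == 0 then (coef, st.2.1 ++ coef ++ "x^3+".toList, st.2.2 + 1)
  else if st.2.2 == 1 then (coef, st.2.1 ++ coef ++ "x^2+".toList, st.2.2 + 1)
  else if st.2.2 == 2 then (coef, st.2.1 ++ coef ++ "x+".toList, st.2.2 + 1)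
  else (coef, st.2.1 ++ coef ++ ['\n'], 0)

def setAnsw (msg : String) : String :=
  let msgArr := PySem.Chars.splitOn msg.toList ['x']
  let res := (PySem.List.pyRange (PySem.List.len msgArr - 1) 0 (-1)).foldl
    (setAnswStep msgArr) ([], "SPLINES: \n".toList, 0)
  String.ofList res.2.1

-- ===== PORT B =====
-- B's _clean: strip the 3-char prefix and 2-char suffix, drop a leading char if '=' remains.
def cleanCoef (s : List Char) : List Char :=
  let c := PySem.List.slice s (some 3) (some (PySem.List.len s - 2))
  if PySem.Chars.isIn ['='] c then PySem.List.slice c (some 1) none else c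

-- B's _render: one polynomial line (up to four coefficients) per recursive call.
def renderLines : List (List Char) → List Char
  | [] => []
  | [a] => a ++ "x^3+".toList
  | [a, b] => a ++ "x^3+".toList ++ b ++ "x^2+".toList
  | [a, b, c] => a ++ "x^3+".toList ++ b ++ "x^2+".toList ++ c ++ "x+".toList
  | a :: b :: c :: d :: rest =>
      a ++ "x^3+".toList ++ b ++ "x^2+".toList ++ c ++ "x+".toList ++ d ++ ['\n'] ++
        renderLines rest

def setAnsw_alt (msg : String) : String :=
  let pieces := (PySem.List.slice (PySem.Chars.splitOn msg.toList ['x']) (some 1) none).reverse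
  String.ofList ("SPLINES: \n".toList ++ renderLines (pieces.map cleanCoef))

-- ===== PRECONDITION & SPEC =====
def Spec_setAnsw (msg : String) (out : String) : Prop := out = setAnsw_alt msg
instance (msg : String) (out : String) : Decidable (Spec_setAnsw msg out) := by unfold Spec_setAnsw; infer_instance

-- ===== CLAIM (what is proved, stated in full; the proofs are below) =====
def Claim_equal_setAnsw : Prop := ∀ (msg : String), Dom_setAnsw msg → Spec_setAnsw msg (setAnsw msg)

-- ===== LEMMAS AND PROOFS =====

-- A's step, re-expressed on the cleaned coefficient (foldl_map bridges to the index form).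
def stepC (st : List Char × List Char × Int) (c : List Char) : List Char × List Char × Int :=
  if st.2.2 == 0 then (c, st.2.1 ++ c ++ "x^3+".toList, st.2.2 + 1)
  else if st.2.2 == 1 then (c, st.2.1 ++ c ++ "x^2+".toList, st.2.2 + 1)
  else if st.2.2 == 2 then (c, st.2.1 ++ c ++ "x+".toList, st.2.2 + 1)
  else (c, st.2.1 ++ c ++ ['\n'], 0)

theorem step_eq (msgArr : List (List Char)) (st : List Char × List Char × Int) (i : Int) :
    setAnswStep msgArr st i = stepC st (cleanCoef (PySem.List.pyGetD msgArr i [])) := by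
  rfl

-- the traversed elements of A are exactly B's reversed tail of the split list
theorem indices_eq (xs : List (List Char)) :
    (PySem.List.pyRange (PySem.List.len xs - 1) 0 (-1)).map
        (fun i => PySem.List.pyGetD xs i ([] : List Char)) = (xs.drop 1).reverse := by
  rw [PySem.List.pyRange_neg_one_eq_reverse, List.map_reverse]
  have h1 : (0 : Int) + 1 = 1 := by norm_num
  have h2 : PySem.List.len xs - 1 + 1 = PySem.List.len xs := by ring
  rw [h1, h2]
  rw [PySem.List.map_pyGetD_pyRange xs ([] : List Char) (by norm_num : (0:Int) ≤ 1)]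
  norm_num

-- core invariant: A's counter fold starting at cont = 0 appends exactly B's rendered lines
theorem fold_eq_render (cs : List (List Char)) (coef acc : List Char) :
    (cs.foldl stepC (coef, acc, 0)).2.1 = acc ++ renderLines cs := by
  induction cs using renderLines.induct generalizing coef acc with
  | case1 => simp [renderLines]
  | case2 a => simp [renderLines, stepC]
  | case3 a b => simp [renderLines, stepC]
  | case4 a b c => simp [renderLines, stepC]
  | case5 a b c d rest ih =>
      simp only [List.foldl_cons, renderLines]
      rw [show stepC (coef, acc, 0) a = (a, acc ++ a ++ "x^3+".toList, 1) from rfl]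
      rw [show stepC (a, acc ++ a ++ "x^3+".toList, 1) b
            = (b, acc ++ a ++ "x^3+".toList ++ b ++ "x^2+".toList, 2) from rfl]
      rw [show stepC (b, acc ++ a ++ "x^3+".toList ++ b ++ "x^2+".toList, 2) c
            = (c, acc ++ a ++ "x^3+".toList ++ b ++ "x^2+".toList ++ c ++ "x+".toList, 3) from rfl]
      rw [show stepC (c, acc ++ a ++ "x^3+".toList ++ b ++ "x^2+".toList ++ c ++ "x+".toList, 3) d
            = (d, acc ++ a ++ "x^3+".toList ++ b ++ "x^2+".toList ++ c ++ "x+".toList ++ d ++ ['\n'], 0) from rfl]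
      rw [ih]
      simp

-- ===== VERDICT =====
theorem setAnsw_spec : Claim_equal_setAnsw := by
  intro msg _
  unfold Spec_setAnsw setAnsw setAnsw_alt
  have hstep : ∀ st i, setAnswStep (PySem.Chars.splitOn msg.toList ['x']) st i
      = stepC st (cleanCoef (PySem.List.pyGetD (PySem.Chars.splitOn msg.toList ['x']) i [])) :=
    step_eq _
  simp only [funext fun st => funext fun i => hstep st i]
  rw [← List.foldl_map (f := fun i => cleanCoef (PySem.List.pyGetD (PySem.Chars.splitOn msg.toList ['x']) i [])) (g := stepC)]
  rw [show (fun i => cleanCoef (PySem.List.pyGetD (PySem.Chars.splitOn msg.toList ['x']) i []))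
        = cleanCoef ∘ (fun i => PySem.List.pyGetD (PySem.Chars.splitOn msg.toList ['x']) i []) from rfl,
      ← List.map_map, indices_eq]
  rw [fold_eq_render, PySem.List.slice_from_one]
  simp [List.tail]
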